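-- pv_equiv track=rewrite | github.com/Elenaorus/Python2 | HomeWork2/Task2.py | num_system
-- ===== SOURCE A (Python) =====
-- def num_system(number, system):
--   num = number
--   num_sys = ''
--   if system == 'hex':
--     while num > 0:
--       num_ost = str(num % 16)
--       if num_ost == '10':
--         num_ost = 'a'
--       elif num_ost == '11':
--         num_ost = 'b'
--       elif num_ost == '12':
--         num_ost = 'c'
--       elif num_ost == '13':
--         num_ost = 'd'
--       elif num_ost == '14':
--         num_ost = 'e'
--       elif num_ost == '15':
--         num_ost = 'f'
--       num_sys += num_ost
--       num //= 16
--   elif system == 'oct':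
--     while num > 0:
--       num_ost = str(num % 8)
--       num_sys += num_ost
--       num //= 8
--   elif system == 'bin':
--     while num > 0:
--       num_ost = str(num % 2)
--       num_sys += num_ost
--       num //= 2
--
--   num_sys = num_sys[::-1]
--   return num_sys
-- ===== SOURCE B (Python) =====
-- def num_system(number, system):
--     if system == 'hex':
--         base = 16
--     elif system == 'oct':
--         base = 8
--     elif system == 'bin':
--         base = 2
--     else:
--         return ''
--
--     def rec(n):
--         if n <= 0:
--             return ''
--         return rec(n // base) + '0123456789abcdef'[n % base]
--
--     return rec(number)
-- ===== Notes on version B (the rewrite author's own statement) =====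
-- stated objective: alternative
-- what changed: Replaces A's three separate while-loops that accumulate digits low-to-high into a string and then reverse it with a single recursive helper that emits high-order digits first (no reversal) and reads each digit from a '0123456789abcdef' table instead of str()+six-way remapping.
import Mathlib
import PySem

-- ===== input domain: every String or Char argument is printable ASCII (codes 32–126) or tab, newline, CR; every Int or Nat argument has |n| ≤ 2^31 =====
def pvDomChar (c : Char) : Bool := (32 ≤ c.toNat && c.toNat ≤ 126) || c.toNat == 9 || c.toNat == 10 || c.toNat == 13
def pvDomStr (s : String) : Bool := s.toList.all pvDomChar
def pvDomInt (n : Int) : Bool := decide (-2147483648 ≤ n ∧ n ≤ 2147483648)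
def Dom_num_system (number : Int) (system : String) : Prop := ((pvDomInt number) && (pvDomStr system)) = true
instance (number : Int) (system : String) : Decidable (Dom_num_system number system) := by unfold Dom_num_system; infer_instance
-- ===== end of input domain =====

-- B replaces A's per-base while-loops (low-to-high digit string + final reversal) by one
-- recursive helper that emits high-order digits first via a '0123456789abcdef' table; same results.


-- ===== PORT A =====
-- termination fact for the while-loops / recursion (num //= b with b > 1 shrinks a positive num)
theorem pvFloordivToNatLt (num b : Int) (hb : 1 < b) (h : 0 < num) :
    (PySem.Int.floordiv num b).toNat < num.toNat := by
  rw [PySem.Int.floordiv_eq_ediv_of_pos (by omega)]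
  have h1 : num / b < num := Int.ediv_lt_of_lt_mul (by omega) (by nlinarith)
  have h2 : 0 ≤ num / b := Int.ediv_nonneg (by omega) (by omega)
  omega

-- the hex loop body's digit: num_ost = str(num % 16) then the six-way remap
def hexDigitA (r : Int) : List Char :=
  let s := PySem.Int.toChars r
  if s = ['1','0'] then ['a']
  else if s = ['1','1'] then ['b']
  else if s = ['1','2'] then ['c']
  else if s = ['1','3'] then ['d']
  else if s = ['1','4'] then ['e']
  else if s = ['1','5'] then ['f']
  else s

-- while num > 0: num_sys += <dig>(num % b); num //= b   (the '1 < b' conjunct is a totality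
-- guard only; every call passes the literal base 16/8/2)
def loopA (b : Int) (dig : Int → List Char) (num : Int) (acc : List Char) : List Char :=
  if h : 0 < num ∧ 1 < b then
    loopA b dig (PySem.Int.floordiv num b) (acc ++ dig (PySem.Int.mod num b))
  else acc
termination_by num.toNat
decreasing_by exact pvFloordivToNatLt num b h.2 h.1

def num_system (number : Int) (system : String) : String :=
  let num_sys : List Char :=
    if system = "hex" then loopA 16 hexDigitA number []
    else if system = "oct" then loopA 8 (fun r => PySem.Int.toChars r) number []
    else if system = "bin" then loopA 2 (fun r => PySem.Int.toChars r) number []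
    else []
  String.ofList num_sys.reverse   -- num_sys[::-1]

-- ===== PORT B =====
-- rec(n) = '' if n <= 0 else rec(n // base) + '0123456789abcdef'[n % base]
-- (the 'b ≤ 1' disjunct is a totality guard only; B calls recB only with base 16/8/2)
def recB (b : Int) (n : Int) : List Char :=
  if n ≤ 0 ∨ b ≤ 1 then []
  else recB b (PySem.Int.floordiv n b) ++
    [(PySem.List.pyGet? "0123456789abcdef".toList (PySem.Int.mod n b)).getD '!']
termination_by n.toNat
decreasing_by exact pvFloordivToNatLt n b (by omega) (by omega)

def num_system_alt (number : Int) (system : String) : String :=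
  if system = "hex" then String.ofList (recB 16 number)
  else if system = "oct" then String.ofList (recB 8 number)
  else if system = "bin" then String.ofList (recB 2 number)
  else ""

-- ===== PRECONDITION & SPEC =====
def Spec_num_system (number : Int) (system : String) (out : String) : Prop := out = num_system_alt number system
instance (number : Int) (system : String) (out : String) : Decidable (Spec_num_system number system out) := by unfold Spec_num_system; infer_instance

-- ===== CLAIM (what is proved, stated in full; the proofs are below) =====
def Claim_equal_num_system : Prop := ∀ (number : Int) (system : String), Dom_num_system number system → Spec_num_system number system (num_system number system)

-- ===== LEMMAS AND PROOFS =====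

-- A's per-step digit string equals B's table digit, for each base used
theorem hexDigitA_eq (r : Int) (h0 : 0 ≤ r) (h1 : r < 16) :
    hexDigitA r = [(PySem.List.pyGet? "0123456789abcdef".toList r).getD '!'] := by
  interval_cases r <;> decide

theorem decDigitA_eq (b r : Int) (hb : b ≤ 10) (h0 : 0 ≤ r) (h1 : r < b) :
    PySem.Int.toChars r = [(PySem.List.pyGet? "0123456789abcdef".toList r).getD '!'] := by
  have hr : r < 10 := by omega
  interval_cases r <;> decide

-- the loop accumulates exactly the reverse of B's recursion
theorem loopA_eq (b : Int) (dig : Int → List Char) (hb : 1 < b)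
    (hdig : ∀ r, 0 ≤ r → r < b →
      dig r = [(PySem.List.pyGet? "0123456789abcdef".toList r).getD '!']) :
    ∀ (k : Nat) (num : Int), num.toNat ≤ k → ∀ acc,
      loopA b dig num acc = acc ++ (recB b num).reverse := by
  intro k
  induction k with
  | zero =>
    intro num hk acc
    have hnum : num ≤ 0 := by omega
    rw [loopA, recB]
    simp [hnum, not_lt.mpr hnum]
  | succ k ih =>
    intro num hk acc
    by_cases hpos : 0 < num
    · have hdiv := pvFloordivToNatLt num b hb hpos
      rw [loopA, recB]
      rw [dif_pos (show 0 < num ∧ 1 < b from ⟨hpos, hb⟩),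
        if_neg (show ¬(num ≤ 0 ∨ b ≤ 1) by omega)]
      rw [ih (PySem.Int.floordiv num b) (by omega)]
      rw [hdig _ (PySem.Int.mod_nonneg num (by omega)) (PySem.Int.mod_lt num (by omega))]
      simp
    · rw [loopA, recB]
      simp [hpos, show num ≤ 0 by omega]

-- ===== VERDICT (by name: the statement is the Claim_ definition above) =====
theorem num_system_spec : Claim_equal_num_system := by
  intro number system _
  unfold Spec_num_system num_system num_system_alt
  by_cases h16 : system = "hex"
  · simp only [h16, reduceIte]
    rw [loopA_eq 16 hexDigitA (by norm_num)
      (fun r h0 h1 => hexDigitA_eq r h0 h1) number.toNat number le_rfl []]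
    simp
  · by_cases h8 : system = "oct"
    · simp only [h16, h8, reduceIte]
      rw [loopA_eq 8 _ (by norm_num)
        (fun r h0 h1 => decDigitA_eq 8 r (by norm_num) h0 h1) number.toNat number le_rfl []]
      simp
    · by_cases h2 : system = "bin"
      · simp only [h2, reduceIte]
        rw [loopA_eq 2 _ (by norm_num)
          (fun r h0 h1 => decDigitA_eq 2 r (by norm_num) h0 h1) number.toNat number le_rfl []]
        simp
      · simp [h16, h8, h2]
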